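-- pv_equiv track=rewrite | github.com/0JMT0/Parasitic-Aware_Common-Centroid_routing | backup/MRTCP_backup.py | dfs_order
-- ===== SOURCE A (Python) =====
-- from collections import deque, defaultdict, Counter
-- from typing import Dict, Iterable, List, Optional, Set, Tuple, Union
--
-- Coordinate = Tuple[int, int]
--
-- def dfs_order(edges: List[Tuple[Coordinate, Coordinate]], root: Coordinate) -> List[Coordinate]:
--     """Return preorder traversal order for a tree described by edges."""
--     adjacency: Dict[Coordinate, List[Coordinate]] = defaultdict(list)
--     for a, b in edges:
--         adjacency[a].append(b)
--         adjacency[b].append(a)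
--
--     order: List[Coordinate] = []
--     stack: List[Coordinate] = [root]
--     seen: set[Coordinate] = set()
--
--     while stack:
--         node = stack.pop()
--         if node in seen:
--             continue
--         seen.add(node)
--         order.append(node)
--         for nbr in sorted(adjacency[node], reverse=True):
--             if nbr not in seen:
--                 stack.append(nbr)
--     return order
-- ===== SOURCE B (Python) =====
-- from collections import defaultdict
--
--
-- def dfs_order(edges, root):
--     """Recursive preorder DFS (ascending neighbour order); the growing
--     order list itself is the visited record -- no stack, no seen set."""
--     adjacency = defaultdict(list)
--     for a, b in edges:
--         adjacency[a].append(b)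
--         adjacency[b].append(a)
--
--     def visit(order, node):
--         if node in order:
--             return order
--         order = order + [node]
--         for nbr in sorted(adjacency[node]):
--             order = visit(order, nbr)
--         return order
--
--     return visit([], root)
-- ===== Notes on version B (the rewrite author's own statement) =====
-- stated objective: alternative
-- what changed: A's iterative loop over an explicit stack (neighbours filtered against a seen set and pushed reverse-sorted) is replaced by a direct recursive preorder: a recursive visit(order, node) that checks membership in the order list itself (no stack, no separate seen set) and recurses over the ascending-sorted neighbours.
import Mathlib
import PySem

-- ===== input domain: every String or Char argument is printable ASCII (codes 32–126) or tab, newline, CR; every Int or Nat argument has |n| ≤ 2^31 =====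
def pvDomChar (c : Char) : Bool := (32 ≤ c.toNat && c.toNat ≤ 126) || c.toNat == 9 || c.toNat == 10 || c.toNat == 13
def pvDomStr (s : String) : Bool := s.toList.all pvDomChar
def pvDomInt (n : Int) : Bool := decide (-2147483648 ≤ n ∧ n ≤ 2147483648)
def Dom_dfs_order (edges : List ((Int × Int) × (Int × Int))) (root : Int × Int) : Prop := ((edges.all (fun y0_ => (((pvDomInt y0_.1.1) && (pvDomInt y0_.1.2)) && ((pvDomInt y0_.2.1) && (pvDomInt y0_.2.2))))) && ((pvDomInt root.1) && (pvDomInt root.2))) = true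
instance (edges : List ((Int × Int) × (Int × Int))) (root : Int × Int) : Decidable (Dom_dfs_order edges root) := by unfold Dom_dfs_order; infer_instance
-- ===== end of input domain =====

-- B replaces A's iterative explicit-stack DFS (seen set, neighbours filtered and
-- pushed reverse-sorted) by a direct recursive preorder whose growing order list
-- is itself the visited record.  Objective: alternative decomposition, same result.

-- ===== PORT A =====

-- adjacency building: the defaultdict loop over edges, as A writes it (a fold)
def pvAdj (edges : List ((Int × Int) × (Int × Int))) : PySem.Dict (Int × Int) (List (Int × Int)) :=
  edges.foldl (fun d e => (d.modify e.1 [] (· ++ [e.2])).modify e.2 [] (· ++ [e.1])) PySem.Dict.empty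

-- number of adjacency keys not yet seen: the termination measure of A's loop
def pvUnseen (adj : PySem.Dict (Int × Int) (List (Int × Int))) (s : PySem.Set (Int × Int)) : Nat :=
  (adj.keys.filter (fun x => !PySem.Set.contains s x)).length

-- termination helper: a filter that loses a witness is strictly shorter
theorem pvFilter_len_lt {α : Type} (l : List α) (p q : α → Bool)
    (himp : ∀ x, q x = true → p x = true) (x : α) (hx : x ∈ l)
    (hpx : p x = true) (hqx : q x = false) :
    (l.filter q).length < (l.filter p).length := by
  have hsub : List.Sublist (l.filter q) (l.filter p) := List.monotone_filter_right l himp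
  refine Nat.lt_of_le_of_ne hsub.length_le ?_
  intro heq
  have : l.filter q = l.filter p := hsub.eq_of_length heq
  have hmem : x ∈ l.filter p := List.mem_filter.mpr ⟨hx, hpx⟩
  rw [← this] at hmem
  have := (List.mem_filter.mp hmem).2
  simp [hqx] at this

theorem pvContains_add (s : PySem.Set (Int × Int)) (x y : Int × Int) :
    PySem.Set.contains (s.add x) y = (PySem.Set.contains s y || decide (y = x)) := by
  simp [pysem]

theorem pvUnseen_add_lt (adj : PySem.Dict (Int × Int) (List (Int × Int)))
    (s : PySem.Set (Int × Int)) (n : Int × Int)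
    (hk : n ∈ adj.keys) (hs : PySem.Set.contains s n = false) :
    pvUnseen adj (s.add n) < pvUnseen adj s := by
  unfold pvUnseen
  refine pvFilter_len_lt _ _ _ ?_ n hk ?_ ?_
  · intro x h
    rw [pvContains_add] at h
    simp only [Bool.not_or, Bool.and_eq_true, Bool.not_eq_true'] at h ⊢
    exact h.1
  · simp only [hs, Bool.not_false]
  · rw [pvContains_add]
    simp

theorem pvUnseen_add_eq (adj : PySem.Dict (Int × Int) (List (Int × Int)))
    (s : PySem.Set (Int × Int)) (n : Int × Int) (hk : n ∉ adj.keys) :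
    pvUnseen adj (s.add n) = pvUnseen adj s := by
  unfold pvUnseen
  congr 1
  refine List.filter_congr ?_
  intro x hx
  rw [pvContains_add]
  have : x ≠ n := fun h => hk (h ▸ hx)
  simp [this]

theorem pvGetD_nil (d : PySem.Dict (Int × Int) (List (Int × Int))) (n : Int × Int)
    (h : n ∉ d.keys) : d.getD n [] = [] := by
  have h2 := (PySem.Dict.get?_eq_none_iff_not_mem_keys d n).mpr h
  simp [PySem.Dict.getD, h2]

-- the while loop of A: flat stack (top at head), seen checked at pop,
-- neighbours pushed iterating sorted(…, reverse=True), filtered by 'not in seen'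
def pvLoopA (adj : PySem.Dict (Int × Int) (List (Int × Int))) :
    List (Int × Int) → PySem.Set (Int × Int) → List (Int × Int)
  | [], _ => []
  | n :: st, s =>
    if PySem.Set.contains s n then pvLoopA adj st s
    else
      n :: pvLoopA adj
        ((PySem.List.sorted (adj.getD n []) (fun x => toLex x) true).foldl
          (fun st2 nbr => if PySem.Set.contains (s.add n) nbr then st2 else nbr :: st2) st)
        (s.add n)
  termination_by st s => (pvUnseen adj s, st.length)
  decreasing_by
  · exact Prod.Lex.right _ (Nat.lt_succ_self _)
  · rename_i hns
    simp only [Bool.not_eq_true] at hns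
    by_cases hk : n ∈ adj.keys
    · exact Prod.Lex.left _ _ (pvUnseen_add_lt adj s n hk hns)
    · rw [pvGetD_nil adj n hk]
      rw [pvUnseen_add_eq adj s n hk]
      exact Prod.Lex.right _ (Nat.lt_succ_self _)

def dfs_order (edges : List ((Int × Int) × (Int × Int))) (root : Int × Int) : List (Int × Int) :=
  pvLoopA (pvAdj edges) [root] PySem.Set.empty

-- ===== PORT B =====

-- adjacency building: the same Python lines, transcribed as structural recursion over edges
def pvAdjB (edges : List ((Int × Int) × (Int × Int)))
    (d : PySem.Dict (Int × Int) (List (Int × Int))) : PySem.Dict (Int × Int) (List (Int × Int)) :=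
  match edges with
  | [] => d
  | e :: rest => pvAdjB rest ((d.modify e.1 [] (· ++ [e.2])).modify e.2 [] (· ++ [e.1]))

-- visit(order, node) of B, fuelled for totality (the fuel provably never runs out
-- at the entry point's value, see the proofs): membership is checked in the order
-- list itself, and the ascending-sorted neighbours are visited left to right
mutual
def pvVisit (adj : PySem.Dict (Int × Int) (List (Int × Int))) :
    Nat → List (Int × Int) → (Int × Int) → List (Int × Int)
  | 0, order, _ => order
  | fuel + 1, order, node =>
    if order.contains node then order
    else pvNbrs adj fuel (order ++ [node]) (PySem.List.sorted (adj.getD node []) (fun x => toLex x))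
  termination_by fuel _ _ => (fuel, 0)
  decreasing_by
  · exact Prod.Lex.left _ _ (Nat.lt_succ_self _)
def pvNbrs (adj : PySem.Dict (Int × Int) (List (Int × Int))) :
    Nat → List (Int × Int) → List (Int × Int) → List (Int × Int)
  | _, order, [] => order
  | fuel, order, nbr :: rest => pvNbrs adj fuel (pvVisit adj fuel order nbr) rest
  termination_by fuel _ l => (fuel, l.length + 1)
  decreasing_by
  · exact Prod.Lex.right _ (Nat.succ_pos _)
  · exact Prod.Lex.right _ (Nat.lt_succ_self _)
end

def dfs_order_alt (edges : List ((Int × Int) × (Int × Int))) (root : Int × Int) : List (Int × Int) :=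
  pvVisit (pvAdjB edges PySem.Dict.empty) (2 * edges.length + 1) [] root

-- ===== PRECONDITION & SPEC =====
def Spec_dfs_order (edges : List ((Int × Int) × (Int × Int))) (root : Int × Int) (out : List (Int × Int)) : Prop := out = dfs_order_alt edges root
instance (edges : List ((Int × Int) × (Int × Int))) (root : Int × Int) (out : List (Int × Int)) : Decidable (Spec_dfs_order edges root out) := by unfold Spec_dfs_order; infer_instance

-- ===== CLAIM (what is proved, stated in full; the proofs are below) =====
def Claim_equal_dfs_order : Prop := ∀ (edges : List ((Int × Int) × (Int × Int))) (root : Int × Int), Dom_dfs_order edges root → Spec_dfs_order edges root (dfs_order edges root)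

-- ===== LEMMAS AND PROOFS =====

theorem pvContains_iff (s : PySem.Set (Int × Int)) (x : Int × Int) :
    PySem.Set.contains s x = true ↔ x ∈ s := by
  simp [pysem]

-- proof-side abbreviation: "not yet seen" as a Bool predicate
def pvNS (s : PySem.Set (Int × Int)) : (Int × Int) → Bool := fun x => !decide (x ∈ s)

theorem pvNS_mem (s : PySem.Set (Int × Int)) (x : Int × Int) (h : x ∈ s) : pvNS s x = false := by
  simp [pvNS, h]

theorem pvNS_not_mem (s : PySem.Set (Int × Int)) (x : Int × Int) (h : x ∉ s) : pvNS s x = true := by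
  simp [pvNS, h]

theorem pvContains_true (s : PySem.Set (Int × Int)) (x : Int × Int) (h : x ∈ s) :
    PySem.Set.contains s x = true := (pvContains_iff s x).mpr h

theorem pvContains_false (s : PySem.Set (Int × Int)) (x : Int × Int) (h : x ∉ s) :
    ¬ PySem.Set.contains s x = true := fun hc => h ((pvContains_iff s x).mp hc)

theorem pvSorted_nil (rev : Bool) :
    PySem.List.sorted ([] : List (Int × Int)) (fun x => toLex x) rev = [] := by
  cases rev <;> rfl

-- descending sort reversed is the ascending sort (keys here are the elements themselves, so ties are equal)
theorem pvSorted_rev_reverse (l : List (Int × Int)) :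
    (PySem.List.sorted l (fun x => toLex x) true).reverse = PySem.List.sorted l (fun x => toLex x) := by
  refine PySem.List.eq_of_perm_of_pairwise_le_of_injective (fun x => toLex x) (fun a b h => h) ?_ ?_ ?_
  · exact (List.reverse_perm _).trans ((PySem.List.sorted_perm l (fun x => toLex x) true).trans
      (PySem.List.sorted_perm l (fun x => toLex x) false).symm)
  · exact (List.pairwise_reverse).mpr (PySem.List.sorted_pairwise_rev l (fun x => toLex x))
  · exact PySem.List.sorted_pairwise l (fun x => toLex x)

-- A's push loop: iterating l and consing the elements not in s' yields (filter, reversed) on top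
theorem pvPush_eq (s' : PySem.Set (Int × Int)) (l st : List (Int × Int)) :
    l.foldl (fun st2 nbr => if PySem.Set.contains s' nbr then st2 else nbr :: st2) st
      = (l.filter (pvNS s')).reverse ++ st := by
  induction l generalizing st with
  | nil => simp
  | cons a t ih =>
    simp only [List.foldl_cons, List.filter_cons]
    by_cases h : a ∈ s'
    · rw [if_pos (pvContains_true s' a h), pvNS_mem s' a h]
      simp only [Bool.false_eq_true, if_false]
      exact ih st
    · rw [if_neg (pvContains_false s' a h), pvNS_not_mem s' a h]
      simp only [if_true]
      rw [ih (a :: st)]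
      simp
  termination_by l.length

-- a stack all of whose elements are seen produces nothing
theorem pvLoopA_all_seen (adj : PySem.Dict (Int × Int) (List (Int × Int)))
    (st : List (Int × Int)) (s : PySem.Set (Int × Int))
    (h : ∀ x ∈ st, x ∈ s) :
    pvLoopA adj st s = [] := by
  induction st with
  | nil => rw [pvLoopA]
  | cons n t ih =>
    rw [pvLoopA, if_pos (pvContains_true s n (h n (List.mem_cons_self ..)))]
    exact ih (fun x hx => h x (List.mem_cons_of_mem _ hx))

-- filter at a grown seen-set factors through the filter at the old one
theorem pvFilter_add (s : PySem.Set (Int × Int)) (n : Int × Int) (l : List (Int × Int)) :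
    l.filter (pvNS (s.add n)) = (l.filter (pvNS s)).filter (fun x => !decide (x = n)) := by
  rw [List.filter_filter]
  refine List.filter_congr ?_
  intro x _
  by_cases hs : x ∈ s <;> by_cases hn : x = n <;>
    simp [pvNS, PySem.Set.mem_add, hs, hn]

-- pvLoopA only depends on the stack's not-yet-seen elements
theorem pvLoopA_congr (adj : PySem.Dict (Int × Int) (List (Int × Int))) :
    ∀ (u L : Nat) (st1 st2 : List (Int × Int)) (s : PySem.Set (Int × Int)),
      pvUnseen adj s = u → st1.length + st2.length = L →
      st1.filter (pvNS s) = st2.filter (pvNS s) →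
      pvLoopA adj st1 s = pvLoopA adj st2 s := by
  intro u
  induction u using Nat.strong_induction_on with
  | _ u IHu =>
  intro L
  induction L using Nat.strong_induction_on with
  | _ L IHL =>
  intro st1 st2 s hu hL hf
  match st1, st2 with
  | [], st2 =>
    have hnil : st2.filter (pvNS s) = [] := by rw [← hf]; simp
    have hall : ∀ x ∈ st2, x ∈ s := by
      intro x hx
      by_contra hc
      have : x ∈ st2.filter (pvNS s) := List.mem_filter.mpr ⟨hx, pvNS_not_mem s x hc⟩
      rw [hnil] at this
      simp at this
    rw [pvLoopA_all_seen adj st2 s hall, pvLoopA]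
  | n :: t1, st2 =>
    by_cases h1 : n ∈ s
    · rw [pvLoopA, if_pos (pvContains_true s n h1)]
      refine IHL (t1.length + st2.length) (by simp [← hL] <;> omega) t1 st2 s hu rfl ?_
      rw [← hf, List.filter_cons, pvNS_mem s n h1]
      simp
    · match st2 with
      | [] =>
        exfalso
        have : n ∈ ([] : List (Int × Int)).filter (pvNS s) := by
          rw [← hf]
          exact List.mem_filter.mpr ⟨List.mem_cons_self .., pvNS_not_mem s n h1⟩
        simp at this
      | m :: t2 =>
        by_cases h2 : m ∈ s
        · conv_rhs => rw [pvLoopA]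
          rw [if_pos (pvContains_true s m h2)]
          refine IHL ((n :: t1).length + t2.length) (by simp [← hL] <;> omega) (n :: t1) t2 s hu rfl ?_
          rw [hf, List.filter_cons, pvNS_mem s m h2]
          simp
        · have hnm : n = m ∧ t1.filter (pvNS s) = t2.filter (pvNS s) := by
            rw [List.filter_cons, List.filter_cons, pvNS_not_mem s n h1, pvNS_not_mem s m h2] at hf
            simp only [if_true] at hf
            exact ⟨List.head_eq_of_cons_eq hf, List.tail_eq_of_cons_eq hf⟩
          obtain ⟨rfl, htails⟩ := hnm
          rw [pvLoopA, pvLoopA, if_neg (pvContains_false s n h1), if_neg (pvContains_false s n h1)]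
          congr 1
          have htails' : ∀ (P : List (Int × Int)),
              (P ++ t1).filter (pvNS (s.add n)) = (P ++ t2).filter (pvNS (s.add n)) := by
            intro P
            simp only [List.filter_append, pvFilter_add, htails]
          rw [pvPush_eq, pvPush_eq]
          by_cases hk : n ∈ adj.keys
          · exact IHu (pvUnseen adj (s.add n))
              (hu ▸ pvUnseen_add_lt adj s n hk (by
                cases hc : PySem.Set.contains s n with
                | true => exact absurd ((pvContains_iff s n).mp hc) h1
                | false => rfl)) _ _ _ _ rfl rfl (htails' _)
          · rw [pvGetD_nil adj n hk]
            simp only [pvSorted_nil, List.filter_nil, List.reverse_nil, List.nil_append]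
            refine IHL (t1.length + t2.length) (by simp [← hL] <;> omega) _ _ _
              (hu ▸ pvUnseen_add_eq adj s n hk) rfl ?_
            have := htails' []
            simpa using this

-- stack decomposition: processing l1 ++ l2 is processing l1, then l2 under the
-- seen set grown by exactly the nodes output during l1
theorem pvLoopA_split (adj : PySem.Dict (Int × Int) (List (Int × Int))) :
    ∀ (u L : Nat) (l1 l2 : List (Int × Int)) (s : PySem.Set (Int × Int)),
      pvUnseen adj s = u → l1.length = L →
      pvLoopA adj (l1 ++ l2) s
        = pvLoopA adj l1 s ++ pvLoopA adj l2 ((pvLoopA adj l1 s).foldl PySem.Set.add s) := by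
  intro u
  induction u using Nat.strong_induction_on with
  | _ u IHu =>
  intro L
  induction L using Nat.strong_induction_on with
  | _ L IHL =>
  intro l1 l2 s hu hL
  match l1 with
  | [] =>
    rw [List.nil_append]
    conv_rhs => rw [pvLoopA]
    simp
  | n :: t =>
    by_cases h1 : n ∈ s
    · rw [List.cons_append, pvLoopA, if_pos (pvContains_true s n h1)]
      conv_rhs => rw [pvLoopA, if_pos (pvContains_true s n h1)]
      exact IHL t.length (by simp [← hL]) t l2 s hu rfl
    · rw [List.cons_append, pvLoopA, if_neg (pvContains_false s n h1)]
      conv_rhs => rw [pvLoopA, if_neg (pvContains_false s n h1)]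
      rw [pvPush_eq, pvPush_eq]
      simp only [List.foldl_cons, ← List.append_assoc]
      by_cases hk : n ∈ adj.keys
      · have hlt : pvUnseen adj (s.add n) < u :=
          hu ▸ pvUnseen_add_lt adj s n hk (by
            cases hc : PySem.Set.contains s n with
            | true => exact absurd ((pvContains_iff s n).mp hc) h1
            | false => rfl)
        have := IHu (pvUnseen adj (s.add n)) hlt
          (((PySem.List.sorted (adj.getD n []) (fun x => toLex x) true).filter
              (pvNS (s.add n))).reverse ++ t).length
          _ l2 (s.add n) rfl rfl
        rw [this]
        simp
      · rw [pvGetD_nil adj n hk]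
        simp only [pvSorted_nil, List.filter_nil, List.reverse_nil, List.nil_append]
        have := IHL t.length (by simp [← hL]) t l2 (s.add n)
          (hu ▸ pvUnseen_add_eq adj s n hk) rfl
        rw [this]
        simp

-- growing the seen set can only shrink the unseen count
theorem pvUnseen_mono (adj : PySem.Dict (Int × Int) (List (Int × Int)))
    (s1 s2 : PySem.Set (Int × Int)) (h : ∀ x, x ∈ s1 → x ∈ s2) :
    pvUnseen adj s2 ≤ pvUnseen adj s1 := by
  unfold pvUnseen
  refine List.Sublist.length_le (List.monotone_filter_right _ ?_)
  intro x hx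
  simp only [Bool.not_eq_true'] at hx ⊢
  cases hc : PySem.Set.contains s1 x with
  | false => rfl
  | true =>
    exact absurd (pvContains_true s2 x (h x ((pvContains_iff s1 x).mp hc)))
      (by rw [hx]; exact Bool.false_ne_true)

-- set(xs ++ ys) is set(xs) grown by folding add over ys
theorem pvOfList_append (xs ys : List (Int × Int)) :
    PySem.Set.ofList (xs ++ ys) = ys.foldl PySem.Set.add (PySem.Set.ofList xs) := by
  rw [PySem.Set.ofList_append]; rfl

-- THE BRIDGE: with enough fuel, B's recursive visit is A's loop run on a
-- one-node stack, appended to the order so far (and likewise for a neighbour list)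
theorem pvBridge (adj : PySem.Dict (Int × Int) (List (Int × Int))) :
    ∀ (fuel : Nat),
      (∀ (order : List (Int × Int)) (node : Int × Int),
        pvUnseen adj (PySem.Set.ofList order) < fuel →
        pvVisit adj fuel order node = order ++ pvLoopA adj [node] (PySem.Set.ofList order))
      ∧ (∀ (order l : List (Int × Int)),
        pvUnseen adj (PySem.Set.ofList order) < fuel →
        pvNbrs adj fuel order l = order ++ pvLoopA adj l (PySem.Set.ofList order)) := by
  intro fuel
  induction fuel using Nat.strong_induction_on with
  | _ fuel IH =>
  have hV : ∀ (order : List (Int × Int)) (node : Int × Int),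
      pvUnseen adj (PySem.Set.ofList order) < fuel →
      pvVisit adj fuel order node = order ++ pvLoopA adj [node] (PySem.Set.ofList order) := by
    intro order node h
    match fuel with
    | 0 => omega
    | f + 1 =>
      by_cases hmem : node ∈ order
      · have hmem' : node ∈ PySem.Set.ofList order := (PySem.Set.mem_ofList order node).mpr hmem
        rw [pvVisit, if_pos (List.contains_iff_mem.mpr hmem)]
        rw [pvLoopA, if_pos (pvContains_true _ node hmem'), pvLoopA]
        simp
      · have hmem' : node ∉ PySem.Set.ofList order :=
          fun hc => hmem ((PySem.Set.mem_ofList order node).mp hc)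
        rw [pvVisit, if_neg (fun hc => hmem (List.contains_iff_mem.mp hc))]
        rw [pvLoopA, if_neg (pvContains_false _ node hmem')]
        rw [pvPush_eq]
        simp only [List.append_nil]
        by_cases hk : node ∈ adj.keys
        · have hlt : pvUnseen adj (PySem.Set.ofList (order ++ [node])) < f := by
            rw [PySem.Set.ofList_append_singleton]
            have := pvUnseen_add_lt adj (PySem.Set.ofList order) node hk (by
              cases hc : PySem.Set.contains (PySem.Set.ofList order) node with
              | true => exact absurd ((pvContains_iff _ node).mp hc) hmem'
              | false => rfl)
            omega
          rw [(IH f (Nat.lt_succ_self f)).2 (order ++ [node])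
            (PySem.List.sorted (adj.getD node []) (fun x => toLex x)) hlt]
          rw [PySem.Set.ofList_append_singleton]
          have hst : pvLoopA adj (PySem.List.sorted (adj.getD node []) (fun x => toLex x))
                ((PySem.Set.ofList order).add node)
              = pvLoopA adj (((PySem.List.sorted (adj.getD node []) (fun x => toLex x) true).filter
                  (pvNS ((PySem.Set.ofList order).add node))).reverse)
                ((PySem.Set.ofList order).add node) := by
            refine (pvLoopA_congr adj (pvUnseen adj ((PySem.Set.ofList order).add node)) _
              _ _ _ rfl rfl ?_).symm
            rw [← List.filter_reverse, pvSorted_rev_reverse, List.filter_filter]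
            refine List.filter_congr ?_
            intro x _
            simp
          rw [← hst]
          simp
        · rw [pvGetD_nil adj node hk]
          simp only [pvSorted_nil, List.filter_nil, List.reverse_nil]
          rw [pvNbrs, pvLoopA]
  refine ⟨hV, ?_⟩
  intro order l h
  induction l generalizing order with
  | nil =>
    rw [pvNbrs, pvLoopA]
    simp
  | cons n rest ih =>
    rw [pvNbrs, hV order n h]
    have hmono : pvUnseen adj (PySem.Set.ofList (order ++ pvLoopA adj [n] (PySem.Set.ofList order)))
        ≤ pvUnseen adj (PySem.Set.ofList order) := by
      refine pvUnseen_mono adj _ _ ?_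
      intro x hx
      rw [PySem.Set.mem_ofList] at hx ⊢
      exact List.mem_append_left _ hx
    rw [ih _ (lt_of_le_of_lt hmono h)]
    have hsplit := pvLoopA_split adj (pvUnseen adj (PySem.Set.ofList order)) 1 [n] rest
      (PySem.Set.ofList order) rfl rfl
    rw [show (n :: rest) = [n] ++ rest from rfl, hsplit, pvOfList_append]
    simp

-- B's adjacency recursion computes A's adjacency fold
theorem pvAdjB_eq (edges : List ((Int × Int) × (Int × Int))) :
    ∀ d, pvAdjB edges d
      = edges.foldl (fun d e => (d.modify e.1 [] (· ++ [e.2])).modify e.2 [] (· ++ [e.1])) d := by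
  induction edges with
  | nil => intro d; rfl
  | cons e rest ih => intro d; rw [pvAdjB, List.foldl_cons, ih]

-- each edge adds at most two keys
theorem pvKeysLen_modify (d : PySem.Dict (Int × Int) (List (Int × Int)))
    (k : Int × Int) (f : List (Int × Int) → List (Int × Int)) :
    ((d.modify k [] f).keys).length ≤ d.keys.length + 1 := by
  rw [PySem.Dict.keys_modify]
  cases hc : d.contains k with
  | true => rw [PySem.Dict.keys_insert_of_contains d _ hc]; omega
  | false => rw [PySem.Dict.keys_insert_of_not_contains d _ hc]; simp

theorem pvAdj_keys_le (edges : List ((Int × Int) × (Int × Int))) :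
    ∀ d : PySem.Dict (Int × Int) (List (Int × Int)),
      ((edges.foldl (fun d e => (d.modify e.1 [] (· ++ [e.2])).modify e.2 [] (· ++ [e.1])) d).keys).length
        ≤ d.keys.length + 2 * edges.length := by
  induction edges with
  | nil => intro d; simp
  | cons e rest ih =>
    intro d
    rw [List.foldl_cons]
    have h1 := ih ((d.modify e.1 [] (· ++ [e.2])).modify e.2 [] (· ++ [e.1]))
    have h2 := pvKeysLen_modify (d.modify e.1 [] (· ++ [e.2])) e.2 (· ++ [e.1])
    have h3 := pvKeysLen_modify d e.1 (· ++ [e.2])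
    simp only [List.length_cons]
    omega

-- with the empty seen set the unseen count is the full key count
theorem pvUnseen_empty (adj : PySem.Dict (Int × Int) (List (Int × Int))) :
    pvUnseen adj (PySem.Set.ofList []) = adj.keys.length := by
  unfold pvUnseen
  have hcong : ∀ x ∈ adj.keys,
      (!PySem.Set.contains (PySem.Set.ofList ([] : List (Int × Int))) x) = true := by
    intro x _
    cases hc : PySem.Set.contains (PySem.Set.ofList ([] : List (Int × Int))) x with
    | false => rfl
    | true =>
      exact absurd ((pvContains_iff _ x).mp hc) (by rw [PySem.Set.mem_ofList]; simp)
  rw [List.filter_congr hcong, List.filter_true]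

-- ===== VERDICT (by name: the statement is the Claim_ definition above) =====
theorem dfs_order_spec : Claim_equal_dfs_order := by
  intro edges root _
  unfold Spec_dfs_order dfs_order dfs_order_alt
  rw [pvAdjB_eq edges PySem.Dict.empty]
  have hfuel : pvUnseen (pvAdj edges) (PySem.Set.ofList []) < 2 * edges.length + 1 := by
    rw [pvUnseen_empty]
    have h := pvAdj_keys_le edges PySem.Dict.empty
    rw [PySem.Dict.keys_empty] at h
    have hadj : (pvAdj edges).keys.length
        ≤ ([] : List (Int × Int)).length + 2 * edges.length := h
    simp only [List.length_nil] at hadj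
    omega
  rw [show (edges.foldl (fun d e => (d.modify e.1 [] (· ++ [e.2])).modify e.2 [] (· ++ [e.1]))
      PySem.Dict.empty) = pvAdj edges from rfl]
  rw [(pvBridge (pvAdj edges) (2 * edges.length + 1)).1 [] root hfuel]
  rfl
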